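-- pv_equiv track=rewrite | github.com/lookinmin/CodingTest | Programmers/Lv2/서버 증설 횟수.py | solution
-- ===== SOURCE A (Python) =====
-- def solution(players, m, k):
--     answer = 0
--     # server: 각 개별 서버가 만료되는 시간(hour)을 저장하는 리스트.
--     # 예를 들어, k=5이고 2시에 서버가 증설되면, 이 서버는 2,3,4,5,6시에 운영되고 7시에 만료됩니다.
--     # 이 리스트에는 해당 서버의 만료 시간인 '7'이 저장됩니다.
--     server = []
--
--     for i in range(len(players)):    # i는 현재 시간
--         needs = players[i] // m      # 지금 필요한 총 서버 수
--
--         active_now = 0               # 현재 운영중인 서버 수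
--         still_active = []            # 현재 시간에도 살아있는 서버들의 만료 시간
--
--         for expire in server:
--             if i < expire:             # 현재 시간이 서버 만료 시간 이전이면, 서버는 아직 운영 중
--                 active_now += 1
--                 still_active.append(expire)
--         server = still_active               # 운영 중인 서버 목록으로 최신화
--
--         plus = 0                            # 이번 시간에 증설할 서버 수
--         if active_now < needs:              # 필요한 서버보다 현재 운영 중인 서버가 적다면
--             plus = needs - active_now       # 부족한 만큼 증설
--
--         if plus > 0:                        # 증설할 서버가 있다면
--             answer += plus                  # 총 증설 횟수에 더함
--             for _ in range(plus):
--                 server.append(i + k)        # 현재 시간 i에 증설된 서버는 (i + k) 시간에 만료됩니다.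
--
--     return answer
-- ===== SOURCE B (Python) =====
-- def solution(players, m, k):
--     # One pass: track the running number of active servers and a map
--     # time -> how many servers expire at that time, instead of rescanning
--     # the whole server list every hour.
--     answer = 0
--     active = 0
--     expire = {}
--     for i, p in enumerate(players):
--         active -= expire.get(i, 0)
--         needs = p // m
--         if active < needs:
--             plus = needs - active
--             answer += plus
--             if k > 0:  # a server serving for k <= 0 hours is never active later
--                 active += plus
--                 expire[i + k] = expire.get(i + k, 0) + plus
--     return answer
-- ===== Notes on version B (the rewrite author's own statement) =====
-- stated objective: faster
-- what changed: Replaces the per-hour rescan of the whole server-expiry list with a single pass that keeps a running active-server count and a dict counting how many servers expire at each hour.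
import Mathlib
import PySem

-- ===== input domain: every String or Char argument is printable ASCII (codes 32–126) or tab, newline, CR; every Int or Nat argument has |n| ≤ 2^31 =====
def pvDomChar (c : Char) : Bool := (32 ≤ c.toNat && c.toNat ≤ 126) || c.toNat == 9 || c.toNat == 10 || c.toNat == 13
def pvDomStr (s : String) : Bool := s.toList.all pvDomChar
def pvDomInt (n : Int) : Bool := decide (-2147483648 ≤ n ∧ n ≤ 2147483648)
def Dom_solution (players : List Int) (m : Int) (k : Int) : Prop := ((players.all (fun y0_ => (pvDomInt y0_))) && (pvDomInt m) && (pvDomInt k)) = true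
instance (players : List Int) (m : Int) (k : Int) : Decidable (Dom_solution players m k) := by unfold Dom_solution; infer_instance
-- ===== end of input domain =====

-- B replaces A's per-hour rescan of the server-expiry list by a single pass with a
-- running active count and an expiry-count dict (objective: faster, asymptotic).


-- ===== PORT A =====
-- A iterates i over range(len(players)) and reads players[i]; ported as structural
-- recursion over the list carrying the index i (exact: i is always in range).
def solutionLoopA (m k : Int) : List Int → Int → List Int → Int → Int
  | [], _, _, answer => answer
  | p :: rest, i, server, answer =>
    let needs := PySem.Int.floordiv p m
    -- inner loop over server: count active and rebuild still_active
    let st := server.foldl (fun (st : Int × List Int) e =>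
      if i < e then (st.1 + 1, st.2 ++ [e]) else st) (0, [])
    let active_now := st.1
    let still_active := st.2
    let plus := if active_now < needs then needs - active_now else 0
    if plus > 0 then
      solutionLoopA m k rest (i + 1) (still_active ++ List.replicate plus.toNat (i + k)) (answer + plus)
    else
      solutionLoopA m k rest (i + 1) still_active answer

def solution (players : List Int) (m : Int) (k : Int) : Int :=
  solutionLoopA m k players 0 [] 0

-- ===== PORT B =====
def solutionLoopB (m k : Int) : List Int → Int → PySem.Dict Int Int → Int → Int → Int
  | [], _, _, _, answer => answer
  | p :: rest, i, expire, active, answer =>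
    let active1 := active - expire.getD i 0
    let needs := PySem.Int.floordiv p m
    if active1 < needs then
      let plus := needs - active1
      if k > 0 then
        solutionLoopB m k rest (i + 1) (expire.insert (i + k) (expire.getD (i + k) 0 + plus)) (active1 + plus) (answer + plus)
      else
        solutionLoopB m k rest (i + 1) expire active1 (answer + plus)
    else
      solutionLoopB m k rest (i + 1) expire active1 answer

def solution_alt (players : List Int) (m : Int) (k : Int) : Int :=
  solutionLoopB m k players 0 PySem.Dict.empty 0 0

-- ===== PRECONDITION & SPEC =====
-- Pre_ excludes exactly the inputs where A raises: m = 0 with a nonempty players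
-- list (ZeroDivisionError on players[i] // m); with players = [] no division runs.
def Pre_solution (players : List Int) (m : Int) (_k : Int) : Prop := m ≠ 0 ∨ players = []
instance (players : List Int) (m : Int) (k : Int) : Decidable (Pre_solution players m k) := by unfold Pre_solution; infer_instance
def pvWitness_solution : List Int × Int × Int := ([6, 2, 5], 2, 2)

def Spec_solution (players : List Int) (m : Int) (k : Int) (out : Int) : Prop := out = solution_alt players m k
instance (players : List Int) (m : Int) (k : Int) (out : Int) : Decidable (Spec_solution players m k out) := by unfold Spec_solution; infer_instance

-- ===== CLAIM (what is proved, stated in full; the proofs are below) =====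
def Claim_equal_solution : Prop := ∀ (players : List Int) (m : Int) (k : Int), Dom_solution players m k → Pre_solution players m k → Spec_solution players m k (solution players m k)

-- ===== LEMMAS AND PROOFS =====

-- A's inner loop (with general accumulator): count and filter of the alive expiries.
lemma innerA_gen (i : Int) (server : List Int) (a : Int) (acc : List Int) :
    server.foldl (fun (st : Int × List Int) e =>
      if i < e then (st.1 + 1, st.2 ++ [e]) else st) (a, acc)
      = (a + (server.countP (fun e => i < e) : Int), acc ++ server.filter (fun e => i < e)) := by
  induction server generalizing a acc with
  | nil => simp
  | cons e t ih =>
    by_cases h : i < e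
    · simp [List.foldl_cons, h, ih, List.append_assoc]
      ring
    · simp [List.foldl_cons, h, ih]

lemma countP_split (i : Int) (l : List Int) :
    l.countP (fun e => i ≤ e) = l.countP (fun e => e = i) + l.countP (fun e => i < e) := by
  induction l with
  | nil => rfl
  | cons e t ih =>
    simp only [List.countP_cons, ih, decide_eq_true_eq]
    split_ifs <;> omega

lemma countP_filter_self (i : Int) (l : List Int) :
    (l.filter (fun e => i < e)).countP (fun e => i < e) = l.countP (fun e => i < e) := by
  induction l with
  | nil => rfl
  | cons e t ih =>
    by_cases h : i < e
    · simp [h, ih]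
    · simp [h, ih]

lemma countP_filter_succ (i : Int) (l : List Int) :
    (l.filter (fun e => i < e)).countP (fun e => i + 1 ≤ e) = l.countP (fun e => i < e) := by
  rw [show (fun e : Int => decide (i + 1 ≤ e)) = (fun e => decide (i < e)) from
      funext fun e => decide_eq_decide.mpr (by omega)]
  exact countP_filter_self i l

lemma countP_filter_eq_of_lt (i j : Int) (hj : i < j) (l : List Int) :
    (l.filter (fun e => i < e)).countP (fun e => e = j) = l.countP (fun e => e = j) := by
  induction l with
  | nil => rfl
  | cons e t ih =>
    by_cases h : i < e
    · simp [h, List.countP_cons, ih]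
    · have he : ¬ (e = j) := by omega
      simp [h, ih, he]

-- Main simulation invariant: B's (active, expire) summarises A's server list.
lemma loop_eq (m k : Int) (rest : List Int) (i : Int) (server : List Int)
    (expire : PySem.Dict Int Int) (active answer : Int)
    (hact : active = (server.countP (fun e => i ≤ e) : Int))
    (hexp : ∀ j : Int, i ≤ j → expire.getD j 0 = (server.countP (fun e => e = j) : Int)) :
    solutionLoopA m k rest i server answer = solutionLoopB m k rest i expire active answer := by
  induction rest generalizing i server expire active answer with
  | nil => simp [solutionLoopA, solutionLoopB]
  | cons p rest ih =>
    simp only [solutionLoopA, solutionLoopB, innerA_gen, zero_add, List.nil_append]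
    have hA : active - expire.getD i 0 = (server.countP (fun e => i < e) : Int) := by
      have := countP_split i server
      rw [hact, hexp i le_rfl]; omega
    rw [hA]
    set needs := PySem.Int.floordiv p m with hneeds
    set cnt : Int := (server.countP (fun e => i < e) : Int) with hcnt
    by_cases hneed : cnt < needs
    · rw [if_pos hneed, if_pos hneed, if_pos (show needs - cnt > 0 by omega)]
      by_cases hk : k > 0
      · rw [if_pos hk]
        apply ih
        · rw [List.countP_append, countP_filter_succ, List.countP_replicate]
          have h1 : ((i : Int) + 1 ≤ i + k) := by omega
          have h2 : (0 : Int) ≤ needs - cnt := by omega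
          simp [h1, Int.toNat_of_nonneg h2]
          try omega
        · intro j hj
          rw [PySem.Dict.getD_insert, List.countP_append, List.countP_replicate,
              countP_filter_eq_of_lt i j (by omega)]
          by_cases hjk : j = i + k
          · have h2 : (0 : Int) ≤ needs - cnt := by omega
            simp [hjk, hexp (i + k) (show i ≤ i + k by omega), Int.toNat_of_nonneg h2]
            try omega
          · have hjk' : ¬ (i + k = j) := fun h => hjk h.symm
            simp [hjk, hjk', hexp j (show i ≤ j by omega)]
      · rw [if_neg hk]
        apply ih
        · rw [List.countP_append, countP_filter_succ, List.countP_replicate]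
          have h1 : ¬ ((i : Int) + 1 ≤ i + k) := by omega
          simp [h1, hcnt]
        · intro j hj
          rw [List.countP_append, List.countP_replicate,
              countP_filter_eq_of_lt i j (by omega)]
          have h1 : ¬ (i + k = j) := by omega
          simp [h1, hexp j (by omega)]
    · rw [if_neg hneed, if_neg (by omega : ¬ ((0:Int) > 0)), if_neg hneed]
      apply ih
      · rw [countP_filter_succ]
      · intro j hj
        rw [countP_filter_eq_of_lt i j (by omega), hexp j (by omega)]

-- ===== VERDICT (by name: the statement is the Claim_ definition above) =====
theorem solution_spec : Claim_equal_solution := by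
  intro players m k _ _
  unfold Spec_solution solution solution_alt
  exact loop_eq m k players 0 [] PySem.Dict.empty 0 0 (by simp) (by intro j _; simp)
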